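-- pv_equiv track=rewrite | github.com/SethHWeidman/codeforces | 026_make_it_increasing/make_it_increasing.py | make_it_increasing
-- ===== SOURCE A (Python) =====
-- def make_it_increasing(n: int, nums: list[int]) -> int:
--     is_increasing = True
--     for i in range(n - 1):
--         if nums[i] >= nums[i + 1]:
--             is_increasing = False
--     if is_increasing:
--         return 0
--
--     i = n - 1
--     num_divisions = 0
--     while i > 0:
--         greater_element = nums[i]
--         lesser_element = nums[i - 1]
--         # start the halving
--         while lesser_element >= greater_element and lesser_element > 0:
--             lesser_element = int(lesser_element / 2)
--             num_divisions += 1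
--         # edge case: if both `greater_element` and `lesser_element` end up as 0, there
--         # must be no way to make the sequence increasing, so we exit
--         if greater_element == 0 and lesser_element == 0:
--             return -1
--         nums[i - 1] = lesser_element
--         i -= 1
--     return num_divisions
-- ===== SOURCE B (Python) =====
-- def make_it_increasing(n: int, nums: list[int]) -> int:
--     # Closed-form halving: instead of repeatedly halving each element in an
--     # inner while loop, compute the number of halvings directly from bit
--     # lengths and apply them with one shift.  Single right-to-left pass over
--     # nums[:n]; does not mutate nums (the original mutates it in place).
--     if n <= 1:
--         return 0
--     count = 0
--     prev = None
--     for x in reversed(nums[:n]):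
--         if prev is not None and x >= prev and x > 0:
--             k = x.bit_length() if prev <= 0 else (x // prev).bit_length()
--             count += k
--             x >>= k
--         if prev == 0 and x == 0:
--             return -1
--         prev = x
--     return count
-- ===== Notes on version B (the rewrite author's own statement) =====
-- stated objective: alternative
-- what changed: B eliminates A's inner repeated-halving while-loop: the number of halvings of each element is computed in closed form from bit lengths (x.bit_length() if the ceiling is <= 0, else (x // ceiling).bit_length()) and applied with a single shift, in one right-to-left pass without A's separate is-increasing pre-scan; B does not mutate nums (A does, in place).
import Mathlib
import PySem

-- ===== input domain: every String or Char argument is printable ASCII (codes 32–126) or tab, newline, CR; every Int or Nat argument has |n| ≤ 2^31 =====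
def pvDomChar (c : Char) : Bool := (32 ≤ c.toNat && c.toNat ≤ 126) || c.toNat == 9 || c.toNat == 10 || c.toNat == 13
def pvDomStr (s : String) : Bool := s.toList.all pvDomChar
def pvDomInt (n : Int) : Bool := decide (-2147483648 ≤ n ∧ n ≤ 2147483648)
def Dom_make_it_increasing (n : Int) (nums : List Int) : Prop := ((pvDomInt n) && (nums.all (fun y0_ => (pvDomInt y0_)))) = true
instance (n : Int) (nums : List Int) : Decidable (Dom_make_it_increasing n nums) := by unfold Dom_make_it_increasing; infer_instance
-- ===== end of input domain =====

-- B replaces A's inner halving while-loop by a closed-form bit-length computation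
-- (one shift per element) in a single right-to-left pass; equivalence is about the
-- RETURN value — A mutates `nums` in place, B does not.

-- ===== PORT A =====

-- A's inner `while lesser >= greater and lesser > 0: lesser = int(lesser/2); cnt += 1`.
-- `x / 2` is exact for `int(x/2)` because the loop guard ensures x > 0 there.
def pvHalve (x bound cnt : Int) : Int × Int :=
  if x ≥ bound ∧ x > 0 then pvHalve (x / 2) bound (cnt + 1) else (x, cnt)
termination_by x.toNat
decreasing_by omega

-- the `while i > 0` loop of A; fuel = i, the list is A's mutated `nums`
def pvLoopA : Nat → List Int → Int → Int
  | 0, _, cnt => cnt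
  | i + 1, nums, cnt =>
    let greater := PySem.List.pyGetD nums ((i : Int) + 1) 0
    let lesser := PySem.List.pyGetD nums (i : Int) 0
    let r := pvHalve lesser greater cnt
    if greater = 0 ∧ r.1 = 0 then -1
    else pvLoopA i (nums.set i r.1) r.2

def make_it_increasing (n : Int) (nums : List Int) : Int :=
  let is_increasing := (PySem.List.pyRange 0 (n - 1) 1).foldl
    (fun b i => if PySem.List.pyGetD nums i 0 ≥ PySem.List.pyGetD nums (i + 1) 0 then false else b)
    true
  if is_increasing then 0
  else pvLoopA (n - 1).toNat nums 0

-- ===== PORT B =====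

-- B's closed-form halving count: `x.bit_length() if prev <= 0 else (x // prev).bit_length()`
def pvK (x p : Int) : Nat :=
  if p ≤ 0 then PySem.Int.bitLength x else PySem.Int.bitLength (PySem.Int.floordiv x p)

-- B's `for x in reversed(nums[:n])` loop; state = (count, prev), `-1` = the early return.
-- Python's `x >> k` is Lean's `x >>> k` (PYSEM.md).
def pvLoopB : List Int → Int → Option Int → Int
  | [], count, _ => count
  | x :: rest, count, prev =>
    let r : Int × Int :=
      match prev with
      | some p => if x ≥ p ∧ x > 0 then ((pvK x p : Int), x >>> pvK x p) else (0, x)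
      | none => (0, x)
    if prev = some 0 ∧ r.2 = 0 then -1
    else pvLoopB rest (count + r.1) (some r.2)

def make_it_increasing_alt (n : Int) (nums : List Int) : Int :=
  if n ≤ 1 then 0
  else pvLoopB (PySem.List.slice nums none (some n)).reverse 0 none

-- ===== PRECONDITION & SPEC =====
-- A raises IndexError when 2 ≤ n and n > len(nums) (it reads nums[n-1]); those inputs
-- are excluded.  For n ≤ 1 both loops are vacuous and A returns 0.
def Pre_make_it_increasing (n : Int) (nums : List Int) : Prop :=
  n ≤ 1 ∨ n ≤ nums.length
instance (n : Int) (nums : List Int) : Decidable (Pre_make_it_increasing n nums) := by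
  unfold Pre_make_it_increasing; infer_instance

def pvWitness_make_it_increasing : Int × List Int := (3, [5, 4, 3])

def Spec_make_it_increasing (n : Int) (nums : List Int) (out : Int) : Prop := out = make_it_increasing_alt n nums
instance (n : Int) (nums : List Int) (out : Int) : Decidable (Spec_make_it_increasing n nums out) := by unfold Spec_make_it_increasing; infer_instance

-- ===== CLAIM (what is proved, stated in full; the proofs are below) =====
def Claim_equal_make_it_increasing : Prop := ∀ (n : Int) (nums : List Int), Dom_make_it_increasing n nums → Pre_make_it_increasing n nums → Spec_make_it_increasing n nums (make_it_increasing n nums)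

-- ===== LEMMAS AND PROOFS =====

theorem pvHalve_of_stop {x b : Int} (h : ¬ (x ≥ b ∧ x > 0)) (cnt : Int) :
    pvHalve x b cnt = (x, cnt) := by
  rw [pvHalve]; simp [h]

-- A's iterated halving equals B's closed form: pvK halvings, applied as one shift
theorem pvHalve_closed (x b cnt : Int) (hb : b ≤ x) (hx : 0 < x) :
    pvHalve x b cnt = (x >>> pvK x b, cnt + (pvK x b : Int)) := by
  have H : ∀ m : Nat, ∀ x cnt : Int, x.toNat ≤ m → b ≤ x → 0 < x →
      pvHalve x b cnt = (x >>> pvK x b, cnt + (pvK x b : Int)) := by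
    intro m
    induction m with
    | zero => intro x cnt hm hb hx; exact absurd hx (by omega)
    | succ m ih =>
      intro x cnt hm hb hx
      obtain ⟨mx, rfl⟩ : ∃ mx : Nat, x = (mx : Int) := ⟨x.toNat, by omega⟩
      have hmx : 0 < mx := by exact_mod_cast hx
      have hstep : pvHalve (mx : Int) b cnt = pvHalve ((mx : Int) / 2) b (cnt + 1) := by
        rw [pvHalve, if_pos ⟨hb, hx⟩]
      have hdiv : ((mx : Int)) / 2 = ((mx / 2 : Nat) : Int) := by omega
      have hshiftc : ∀ k : Nat, ((mx : Int)) >>> (k + 1) = ((mx / 2 : Nat) : Int) >>> k := by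
        intro k
        rw [← Int.natCast_shiftRight, ← Int.natCast_shiftRight]
        refine congrArg _ ?_
        rw [Nat.shiftRight_eq_div_pow, Nat.shiftRight_eq_div_pow,
            Nat.div_div_eq_div_mul, pow_succ, mul_comm (2 ^ k) 2, ← Nat.div_div_eq_div_mul]
      by_cases hble0 : b ≤ 0
      · -- prev ≤ 0: halve all the way down to 0; k = bitLength x
        rw [hstep, hdiv]
        rcases Nat.lt_or_ge mx 2 with h2 | h2
        · -- mx = 1
          have hmx1 : mx = 1 := by omega
          subst hmx1
          have h0 : pvHalve (((1 / 2 : Nat)) : Int) b (cnt + 1) = (0, cnt + 1) := by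
            rw [pvHalve]; simp
          rw [h0]
          simp only [pvK, if_pos hble0]
          have hk1 : PySem.Int.bitLength ((1 : Nat) : Int) = 1 := by decide
          rw [hk1]
          simp only [Prod.mk.injEq]
          exact ⟨by decide, by push_cast; ring⟩
        · have hlt : ((mx / 2 : Nat) : Int).toNat ≤ m := by omega
          have hpos2 : (0 : Int) < ((mx / 2 : Nat) : Int) := by
            have h1 : 1 ≤ mx / 2 := by omega
            exact_mod_cast h1
          rw [ih _ (cnt + 1) hlt (by omega) hpos2]
          simp only [pvK, if_pos hble0]
          rw [PySem.Int.bitLength_natCast (m := mx) hmx, hshiftc]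
          simp only [Prod.mk.injEq]
          exact ⟨trivial, by push_cast; ring⟩
      · -- prev > 0: k = bitLength (x // prev)
        obtain ⟨bn, rfl⟩ : ∃ bn : Nat, b = (bn : Int) := ⟨b.toNat, by omega⟩
        have hbn : 0 < bn := by omega
        have hble : bn ≤ mx := by exact_mod_cast hb
        have hq : PySem.Int.floordiv (mx : Int) (bn : Int) = ((mx / bn : Nat) : Int) :=
          PySem.Int.floordiv_natCast mx bn
        rw [hstep, hdiv]
        rcases Nat.lt_or_ge (mx / 2) bn with hsm | hsm
        · -- x/2 < prev: exactly one halving; x // prev = 1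
          have hq1 : mx / bn = 1 := Nat.div_eq_of_lt_le (by omega) (by omega)
          have h0 : pvHalve ((mx / 2 : Nat) : Int) (bn : Int) (cnt + 1)
              = (((mx / 2 : Nat) : Int), cnt + 1) := pvHalve_of_stop (by omega) (cnt + 1)
          rw [h0]
          simp only [pvK, if_neg (show ¬ ((bn : Nat) : Int) ≤ 0 by omega)]
          rw [hq, hq1]
          have hk1 : PySem.Int.bitLength ((1 : Nat) : Int) = 1 := by decide
          rw [hk1]
          simp only [Prod.mk.injEq]
          refine ⟨?_, by push_cast; ring⟩
          rw [show (1 : Nat) = 0 + 1 from rfl, hshiftc 0]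
          simp
        · -- x/2 ≥ prev: recurse
          have hlt : ((mx / 2 : Nat) : Int).toNat ≤ m := by omega
          have hb2 : ((bn : Nat) : Int) ≤ ((mx / 2 : Nat) : Int) := by exact_mod_cast hsm
          have hpos2 : (0 : Int) < ((mx / 2 : Nat) : Int) := by
            have h1 : 0 < mx / 2 := by omega
            exact_mod_cast h1
          rw [ih _ (cnt + 1) hlt hb2 hpos2]
          simp only [pvK, if_neg (show ¬ ((bn : Nat) : Int) ≤ 0 by omega)]
          have hq2 : PySem.Int.floordiv ((mx / 2 : Nat) : Int) (bn : Int)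
              = ((mx / 2 / bn : Nat) : Int) := PySem.Int.floordiv_natCast (mx / 2) bn
          have hqq : mx / 2 / bn = mx / bn / 2 := by
            rw [Nat.div_div_eq_div_mul, Nat.div_div_eq_div_mul, mul_comm]
          have hqpos : 0 < mx / bn := (Nat.one_le_div_iff hbn).mpr hble
          rw [hq, hq2, hqq, PySem.Int.bitLength_natCast (m := mx / bn) hqpos, hshiftc]
          simp only [Prod.mk.injEq]
          exact ⟨trivial, by push_cast; ring⟩
  exact H x.toNat x cnt le_rfl hb hx

theorem take_set_self (l : List Int) (i : Nat) (v : Int) :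
    (l.set i v).take i = l.take i := by
  apply List.ext_getElem
  · simp
  · intro j h1 h2
    have hj : j < i := by simp at h1; omega
    simp [Nat.ne_of_gt hj]

-- A's while-i loop over the current list L equals B's pass over the reversed prefix
theorem pvLoopA_eq_loopB (i : Nat) :
    ∀ (L : List Int) (cnt : Int), i < L.length →
      pvLoopA i L cnt = pvLoopB ((L.take i).reverse) cnt (some (PySem.List.pyGetD L (i : Int) 0)) := by
  induction i with
  | zero => intro L cnt _; simp [pvLoopA, pvLoopB]
  | succ i ih =>
    intro L cnt hlen
    have hi : i < L.length := by omega
    have hg : PySem.List.pyGetD L ((i : Int) + 1) 0 = L[i + 1] := by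
      have := PySem.List.pyGetD_eq_getElem (xs := L) (i := (i : Int) + 1) (d := 0)
        (by positivity) (by omega)
      simpa using this
    have hg' : PySem.List.pyGetD L ((i + 1 : Nat) : Int) 0 = L[i + 1] := by
      push_cast; exact hg
    have hl : PySem.List.pyGetD L (i : Int) 0 = L[i] := by
      have := PySem.List.pyGetD_eq_getElem (xs := L) (i := (i : Int)) (d := 0)
        (by positivity) (by omega)
      simpa using this
    have htake : (L.take (i + 1)).reverse = L[i] :: (L.take i).reverse := by
      rw [List.take_add_one]
      simp [List.getElem?_eq_getElem hi]
    by_cases hcond : L[i] ≥ L[i+1] ∧ L[i] > 0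
    · -- halving fires: closed form
      set k := pvK L[i] L[i+1] with hk
      have hclosed : pvHalve L[i] L[i+1] cnt = (L[i] >>> k, cnt + (k : Int)) :=
        pvHalve_closed _ _ _ hcond.1 hcond.2
      have hset : PySem.List.pyGetD (L.set i (L[i] >>> k)) (i : Int) 0 = L[i] >>> k := by
        have := PySem.List.pyGetD_eq_getElem (xs := L.set i (L[i] >>> k)) (i := (i : Int)) (d := 0)
          (by positivity) (by simp; omega)
        simpa [List.getElem_set_self] using this
      simp only [pvLoopA, hg, hg', hl, hclosed, htake, pvLoopB, if_pos hcond]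
      by_cases hz : L[i+1] = 0 ∧ L[i] >>> k = 0
      · rw [if_pos hz, if_pos (by simpa using hz)]
      · rw [if_neg hz, if_neg (by simpa using hz),
            ih (L.set i (L[i] >>> k)) (cnt + (k : Int)) (by simpa using hi),
            take_set_self, hset]
    · -- no halving: value and count unchanged
      have hstop : pvHalve L[i] L[i+1] cnt = (L[i], cnt) := pvHalve_of_stop hcond cnt
      have hset : PySem.List.pyGetD (L.set i L[i]) (i : Int) 0 = L[i] := by
        have := PySem.List.pyGetD_eq_getElem (xs := L.set i L[i]) (i := (i : Int)) (d := 0)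
          (by positivity) (by simp; omega)
        simpa [List.getElem_set_self] using this
      simp only [pvLoopA, hg, hg', hl, hstop, htake, pvLoopB, if_neg hcond, add_zero]
      by_cases hz : L[i+1] = 0 ∧ L[i] = 0
      · rw [if_pos hz, if_pos (by simpa using hz)]
      · rw [if_neg hz, if_neg (by simpa using hz),
            ih (L.set i L[i]) cnt (by simpa using hi), take_set_self, hset]

-- on a strictly decreasing (towards the head) chain B's pass adds nothing
theorem pvLoopB_of_chain (ys : List Int) (p c : Int)
    (h : (p :: ys).IsChain (fun a b => b < a)) :
    pvLoopB ys c (some p) = c := by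
  induction ys generalizing p c with
  | nil => simp [pvLoopB]
  | cons x rest ih =>
    rw [List.isChain_cons] at h
    obtain ⟨hhead, hrest⟩ := h
    have hx : x < p := hhead x rfl
    have hcond : ¬ (x ≥ p ∧ x > 0) := by omega
    have hne : ¬ ((some p : Option Int) = some 0 ∧ x = 0) := by
      intro ⟨h1, h2⟩
      have : p = 0 := by simpa using h1
      omega
    simp only [pvLoopB, if_neg hcond]
    rw [if_neg hne]
    simpa using ih x c hrest

-- A's first pass computes `initial && all pairs increasing`
theorem foldl_inc (nums : List Int) (L : List Int) (b : Bool) :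
    L.foldl (fun b i =>
        if PySem.List.pyGetD nums i 0 ≥ PySem.List.pyGetD nums (i + 1) 0 then false else b) b
      = (b && L.all (fun i =>
          decide (PySem.List.pyGetD nums i 0 < PySem.List.pyGetD nums (i + 1) 0))) := by
  induction L generalizing b with
  | nil => simp
  | cons y ys ih =>
    simp only [List.foldl_cons, List.all_cons, ih]
    split_ifs with h
    · simp [show ¬ PySem.List.pyGetD nums y 0 < PySem.List.pyGetD nums (y + 1) 0 by omega]
    · simp [show PySem.List.pyGetD nums y 0 < PySem.List.pyGetD nums (y + 1) 0 by omega]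

-- ===== VERDICT (by name: the statement is the Claim_ definition above) =====
theorem make_it_increasing_spec : Claim_equal_make_it_increasing := by
  intro n L _ hpre
  unfold Spec_make_it_increasing make_it_increasing make_it_increasing_alt
  by_cases hn : n ≤ 1
  · have : PySem.List.pyRange 0 (n - 1) 1 = [] :=
      PySem.List.pyRange_one_eq_nil (by omega)
    simp [this, hn]
  · have hnl : n ≤ L.length := by
      rcases hpre with h | h
      · omega
      · exact h
    have hn2 : 2 ≤ n := by omega
    simp only [if_neg hn]
    set m := (n - 1).toNat with hm
    have hmi : (m : Int) = n - 1 := by omega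
    have hmlt : m < L.length := by omega
    have hslice : PySem.List.slice L none (some n) = L.take (m + 1) := by
      have hcast : (n : Int) = ((m + 1 : Nat) : Int) := by omega
      rw [hcast, PySem.List.slice_to_natCast]
    have htake : (L.take (m + 1)).reverse = L[m] :: (L.take m).reverse := by
      rw [List.take_add_one]
      simp [List.getElem?_eq_getElem hmlt]
    have hgm : PySem.List.pyGetD L (m : Int) 0 = L[m] := by
      have := PySem.List.pyGetD_eq_getElem (xs := L) (i := (m : Int)) (d := 0)
        (by positivity) (by omega)
      simpa using this
    have hBshape : pvLoopB (PySem.List.slice L none (some n)).reverse 0 none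
        = pvLoopB ((L.take m).reverse) 0 (some L[m]) := by
      rw [hslice, htake]
      simp [pvLoopB]
    rw [foldl_inc, Bool.true_and]
    by_cases hinc : ((PySem.List.pyRange 0 (n - 1) 1).all (fun i =>
        decide (PySem.List.pyGetD L i 0 < PySem.List.pyGetD L (i + 1) 0))) = true
    · -- already increasing: A returns 0; B's pass counts 0
      have hchain0 : (L.take (m + 1)).IsChain (fun a b : Int => a < b) := by
        rw [List.isChain_iff_getElem]
        intro j hj
        have hjlen : j + 1 < m + 1 := by
          simpa [Nat.min_eq_left (by omega : m + 1 ≤ L.length)] using hj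
        have hmem := List.all_eq_true.mp hinc (j : Int)
          (by rw [PySem.List.mem_pyRange_one]; constructor <;> omega)
        have hgj : PySem.List.pyGetD L (j : Int) 0 = L[j] := by
          have := PySem.List.pyGetD_eq_getElem (xs := L) (i := (j : Int)) (d := 0)
            (by positivity) (by omega)
          simpa using this
        have hgj1 : PySem.List.pyGetD L ((j : Int) + 1) 0 = L[j + 1] := by
          have := PySem.List.pyGetD_eq_getElem (xs := L) (i := (j : Int) + 1) (d := 0)
            (by positivity) (by omega)
          simpa using this
        rw [hgj, hgj1] at hmem
        have hlt := of_decide_eq_true hmem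
        simpa [List.getElem_take] using hlt
      have hchain : ((L.take (m + 1)).reverse).IsChain (fun a b : Int => b < a) := by
        rw [List.isChain_reverse]; exact hchain0
      rw [htake] at hchain
      rw [if_pos hinc, hBshape]
      exact (pvLoopB_of_chain _ _ _ hchain).symm
    · rw [if_neg hinc, hBshape, pvLoopA_eq_loopB m L 0 hmlt, hgm]
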